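-- pv_equiv track=rewrite | github.com/FBS93/embedded_c_framework | sw/ecf/tools/eff_gen/eff_gen.py | extract_declarations
-- ===== SOURCE A (Python) =====
-- def extract_declarations(source_text):
--   declarations = []
--   current_declaration = []
--   paren_depth = 0
--   brace_depth = 0
--   bracket_depth = 0
--
--   for character in source_text:
--     current_declaration.append(character)
--
--     if character == '(':
--       paren_depth += 1
--     elif character == ')':
--       paren_depth -= 1
--     elif character == '{':
--       brace_depth += 1
--     elif character == '}':
--       brace_depth -= 1
--     elif character == '[':
--       bracket_depth += 1
--     elif character == ']':
--       bracket_depth -= 1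
--
--     if (character == ';' and paren_depth == 0 and brace_depth == 0 and
--         bracket_depth == 0):
--       declarations.append(''.join(current_declaration).strip())
--       current_declaration = []
--
--   return declarations
-- ===== SOURCE B (Python) =====
-- def _top_level_semicolon(text):
--   opens = {'(': 0, '{': 1, '[': 2}
--   closes = {')': 0, '}': 1, ']': 2}
--   depth = [0, 0, 0]
--   for i, c in enumerate(text):
--     if c in opens:
--       depth[opens[c]] += 1
--     elif c in closes:
--       depth[closes[c]] -= 1
--     elif c == ';' and depth == [0, 0, 0]:
--       return i
--   return -1
--
--
-- def extract_declarations(source_text):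
--   out = []
--   rest = source_text
--   while True:
--     cut = _top_level_semicolon(rest)
--     if cut < 0:
--       return out
--     out.append(rest[:cut + 1].strip())
--     rest = rest[cut + 1:]
-- ===== Notes on version B (the rewrite author's own statement) =====
-- stated objective: alternative
-- what changed: B is a staged decomposition: a helper scans for the index of the next top-level semicolon using a bracket->slot mapping and a depth vector, and the driver repeatedly slices off and strips one declaration at a time, instead of A's single character-by-character fold that grows the current declaration one char at a time.
import Mathlib
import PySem

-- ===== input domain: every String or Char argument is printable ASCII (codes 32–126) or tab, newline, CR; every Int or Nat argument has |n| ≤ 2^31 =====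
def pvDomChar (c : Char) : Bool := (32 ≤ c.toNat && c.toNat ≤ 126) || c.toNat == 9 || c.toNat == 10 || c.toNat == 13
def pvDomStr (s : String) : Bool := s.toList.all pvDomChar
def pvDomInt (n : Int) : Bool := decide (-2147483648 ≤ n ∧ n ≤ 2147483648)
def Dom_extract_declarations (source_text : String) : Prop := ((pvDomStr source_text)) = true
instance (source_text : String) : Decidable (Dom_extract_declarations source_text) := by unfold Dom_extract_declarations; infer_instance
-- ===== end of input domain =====

-- B re-implements A as a staged slice-one-declaration-at-a-time loop over a next-top-level-semicolon search; same cost, different decomposition; return value only.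

-- ===== PORT A =====
-- A's elif chain updating the three depth counters
def pvDelta (st : Int × Int × Int) (c : Char) : Int × Int × Int :=
  match st with
  | (p, b, k) =>
    if c = '(' then (p + 1, b, k)
    else if c = ')' then (p - 1, b, k)
    else if c = '{' then (p, b + 1, k)
    else if c = '}' then (p, b - 1, k)
    else if c = '[' then (p, b, k + 1)
    else if c = ']' then (p, b, k - 1)
    else (p, b, k)

-- one iteration of A's character loop
def pvStepA (st : List String × List Char × (Int × Int × Int)) (c : Char) :
    List String × List Char × (Int × Int × Int) :=
  match st with
  | (decls, cur, cnt) =>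
    let cur' := cur ++ [c]
    let cnt' := pvDelta cnt c
    if c = ';' ∧ cnt'.1 = 0 ∧ cnt'.2.1 = 0 ∧ cnt'.2.2 = 0 then
      (decls ++ [String.ofList (PySem.Chars.strip cur')], [], cnt')
    else (decls, cur', cnt')

def extract_declarations (source_text : String) : List String :=
  (source_text.toList.foldl pvStepA ([], [], (0, 0, 0))).1

-- ===== PORT B =====
-- Source B's two literal dicts mapping bracket characters to their slot in the depth vector
def pvOpens : PySem.Dict Char Nat := PySem.Dict.ofList [('(', 0), ('{', 1), ('[', 2)]
def pvCloses : PySem.Dict Char Nat := PySem.Dict.ofList [(')', 0), ('}', 1), (']', 2)]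

-- _top_level_semicolon's enumerate loop: index of the first top-level ';', or -1
def pvFindSemi : List Char → Nat → List Int → Int
  | [], _, _ => -1
  | c :: cs, i, depth =>
    match pvOpens.get? c with
    | some j => pvFindSemi cs (i + 1) (depth.modify j (· + 1))
    | none =>
      match pvCloses.get? c with
      | some j => pvFindSemi cs (i + 1) (depth.modify j (· - 1))
      | none =>
        if c = ';' ∧ depth = [0, 0, 0] then (i : Int)
        else pvFindSemi cs (i + 1) depth

-- termination fact of the driver loop
theorem pvFindSemi_nil_neg (i : Nat) (d : List Int) : pvFindSemi [] i d = -1 := rfl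

-- Source B's while loop: slice off one declaration at a time
def pvGo (rest : List Char) (out : List String) : List String :=
  let cut := pvFindSemi rest 0 [0, 0, 0]
  if _hcut : cut < 0 then out
  else
    pvGo (PySem.List.slice rest (some (cut + 1)) none)
      (out ++ [String.ofList (PySem.Chars.strip (PySem.List.slice rest none (some (cut + 1))))])
termination_by rest.length
decreasing_by
  have hne : rest ≠ [] := by
    intro hr
    exact _hcut (by simp only [cut, hr, pvFindSemi_nil_neg]; decide)
  have he : pvFindSemi rest 0 [0, 0, 0] + 1
      = (((pvFindSemi rest 0 [0, 0, 0]).toNat + 1 : Nat) : Int) := by push_cast; omega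
  rw [he, PySem.List.slice_from_natCast]
  have hp : 0 < rest.length := List.length_pos_of_ne_nil hne
  simp only [List.length_drop]
  omega

def extract_declarations_alt (source_text : String) : List String :=
  pvGo source_text.toList []

-- ===== PRECONDITION & SPEC =====
def Spec_extract_declarations (source_text : String) (out : List String) : Prop := out = extract_declarations_alt source_text
instance (source_text : String) (out : List String) : Decidable (Spec_extract_declarations source_text out) := by unfold Spec_extract_declarations; infer_instance

-- ===== CLAIM (what is proved, stated in full; the proofs are below) =====
def Claim_equal_extract_declarations : Prop := ∀ (source_text : String), Dom_extract_declarations source_text → Spec_extract_declarations source_text (extract_declarations source_text)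

-- ===== LEMMAS AND PROOFS =====

-- the depth vector B maintains, read off A's three counters
def pvDepthOf (cnt : Int × Int × Int) : List Int := [cnt.1, cnt.2.1, cnt.2.2]

theorem pv_opens_eval (c : Char) : pvOpens.get? c =
    if c = '(' then some 0 else if c = '{' then some 1 else if c = '[' then some 2 else none := by
  have h : pvOpens = PySem.Dict.mk [('(', 0), ('{', 1), ('[', 2)] := by decide
  rw [h, PySem.Dict.get?_mk_cons, PySem.Dict.get?_mk_cons, PySem.Dict.get?_mk_cons]
  simp only [beq_iff_eq]
  split_ifs <;> first | rfl | simp_all [eq_comm]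

theorem pv_closes_eval (c : Char) : pvCloses.get? c =
    if c = ')' then some 0 else if c = '}' then some 1 else if c = ']' then some 2 else none := by
  have h : pvCloses = PySem.Dict.mk [(')', 0), ('}', 1), (']', 2)] := by decide
  rw [h, PySem.Dict.get?_mk_cons, PySem.Dict.get?_mk_cons, PySem.Dict.get?_mk_cons]
  simp only [beq_iff_eq]
  split_ifs <;> first | rfl | simp_all [eq_comm]

-- an opening bracket: B's modify on the depth vector is A's counter bump
theorem pv_open_delta (c : Char) (j : Nat) (cnt : Int × Int × Int)
    (h : pvOpens.get? c = some j) :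
    pvDepthOf (pvDelta cnt c) = (pvDepthOf cnt).modify j (· + 1) ∧ c ≠ ';' := by
  obtain ⟨p, b, k⟩ := cnt
  rw [pv_opens_eval] at h
  split_ifs at h with h1 h2 h3 <;> injection h with h <;> subst h <;> subst_vars <;>
    exact ⟨rfl, by decide⟩

theorem pv_close_delta (c : Char) (j : Nat) (cnt : Int × Int × Int)
    (h : pvCloses.get? c = some j) :
    pvDepthOf (pvDelta cnt c) = (pvDepthOf cnt).modify j (· - 1) ∧ c ≠ ';' := by
  obtain ⟨p, b, k⟩ := cnt
  rw [pv_closes_eval] at h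
  split_ifs at h with h1 h2 h3 <;> injection h with h <;> subst h <;> subst_vars <;>
    exact ⟨rfl, by decide⟩

-- a non-bracket character leaves A's counters alone
theorem pv_other_delta (c : Char) (cnt : Int × Int × Int)
    (ho : pvOpens.get? c = none) (hc : pvCloses.get? c = none) :
    pvDelta cnt c = cnt := by
  obtain ⟨p, b, k⟩ := cnt
  rw [pv_opens_eval] at ho
  rw [pv_closes_eval] at hc
  split_ifs at ho; split_ifs at hc
  simp_all [pvDelta]

theorem pv_depth_zero (cnt : Int × Int × Int) :
    pvDepthOf cnt = [0, 0, 0] ↔ cnt = (0, 0, 0) := by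
  obtain ⟨p, b, k⟩ := cnt
  simp [pvDepthOf, Prod.ext_iff]

theorem pv_stepA_noemit (decls : List String) (cur : List Char) (cnt : Int × Int × Int) (c : Char)
    (h : ¬(c = ';' ∧ (pvDelta cnt c).1 = 0 ∧ (pvDelta cnt c).2.1 = 0 ∧ (pvDelta cnt c).2.2 = 0)) :
    pvStepA (decls, cur, cnt) c = (decls, cur ++ [c], pvDelta cnt c) := by
  simp only [pvStepA]
  rw [if_neg h]

theorem pv_find_shift : ∀ (cs : List Char) (d : List Int) (i : Nat),
    pvFindSemi cs (i + 1) d = if pvFindSemi cs i d = -1 then -1 else pvFindSemi cs i d + 1 := by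
  intro cs
  induction cs with
  | nil => intro d i; simp [pvFindSemi]
  | cons c cs ih =>
    intro d i
    simp only [pvFindSemi]
    cases pvOpens.get? c with
    | some j => exact ih _ _
    | none =>
      cases pvCloses.get? c with
      | some j => exact ih _ _
      | none =>
        by_cases hc : c = ';' ∧ d = [0, 0, 0]
        · rw [if_pos hc, if_pos hc]
          rw [if_neg (show ¬((i : Int) = -1) by omega)]
          push_cast; ring
        · rw [if_neg hc, if_neg hc]
          exact ih _ _

theorem pv_find_cases : ∀ (cs : List Char) (i : Nat) (d : List Int),
    pvFindSemi cs i d = -1 ∨ ∃ k : Nat, pvFindSemi cs i d = ((i + k : Nat) : Int) := by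
  intro cs
  induction cs with
  | nil => intro i d; left; rfl
  | cons c cs ih =>
    intro i d
    simp only [pvFindSemi]
    cases pvOpens.get? c with
    | some j =>
      rcases ih (i + 1) (d.modify j (· + 1)) with h | ⟨k, h⟩
      · left; exact h
      · right
        exact ⟨k + 1, by
          show pvFindSemi cs (i + 1) (d.modify j (· + 1)) = ((i + (k + 1) : Nat) : Int)
          rw [h]; push_cast; ring⟩
    | none =>
      cases pvCloses.get? c with
      | some j =>
        rcases ih (i + 1) (d.modify j (· - 1)) with h | ⟨k, h⟩
        · left; exact h
        · right
          exact ⟨k + 1, by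
            show pvFindSemi cs (i + 1) (d.modify j (· - 1)) = ((i + (k + 1) : Nat) : Int)
            rw [h]; push_cast; ring⟩
      | none =>
        by_cases hc : c = ';' ∧ d = [0, 0, 0]
        · rw [if_pos hc]; right; exact ⟨0, by push_cast; ring⟩
        · rw [if_neg hc]
          rcases ih (i + 1) d with h | ⟨k, h⟩
          · left; exact h
          · right
            exact ⟨k + 1, by
              show pvFindSemi cs (i + 1) d = ((i + (k + 1) : Nat) : Int)
              rw [h]; push_cast; ring⟩

-- from a successor-start search, recover the zero-start search
theorem pv_find_succ_eq (cs : List Char) (d : List Int) {r : Int}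
    (h : pvFindSemi cs 1 d = r) (hr : r ≠ -1) : pvFindSemi cs 0 d = r - 1 := by
  have := pv_find_shift cs d 0
  rw [h] at this
  by_cases h0 : pvFindSemi cs 0 d = -1
  · rw [if_pos h0] at this; omega
  · rw [if_neg h0] at this; omega

theorem pv_find_succ_none (cs : List Char) (d : List Int)
    (h : pvFindSemi cs 1 d = -1) : pvFindSemi cs 0 d = -1 := by
  have := pv_find_shift cs d 0
  rw [h] at this
  by_cases h0 : pvFindSemi cs 0 d = -1
  · exact h0
  · rw [if_neg h0] at this
    rcases pv_find_cases cs 0 d with h' | ⟨k, h'⟩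
    · exact h'
    · omega

theorem pv_fold_none : ∀ (cs : List Char) (cnt : Int × Int × Int)
    (decls : List String) (cur : List Char),
    pvFindSemi cs 0 (pvDepthOf cnt) = -1 →
    cs.foldl pvStepA (decls, cur, cnt) = (decls, cur ++ cs, cs.foldl pvDelta cnt) := by
  intro cs
  induction cs with
  | nil => intro cnt decls cur _; simp
  | cons c cs ih =>
    intro cnt decls cur hj
    rw [pvFindSemi] at hj
    simp only [List.foldl_cons]
    cases ho : pvOpens.get? c with
    | some j =>
      rw [ho] at hj
      have hj' : pvFindSemi cs 1 ((pvDepthOf cnt).modify j (· + 1)) = -1 := hj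
      obtain ⟨hd, hne⟩ := pv_open_delta c j cnt ho
      rw [pv_stepA_noemit _ _ _ _ (by simp [hne])]
      rw [ih (pvDelta cnt c) decls (cur ++ [c]) (by rw [hd]; exact pv_find_succ_none _ _ hj')]
      simp
    | none =>
      rw [ho] at hj
      cases hcl : pvCloses.get? c with
      | some j =>
        rw [hcl] at hj
        have hj' : pvFindSemi cs 1 ((pvDepthOf cnt).modify j (· - 1)) = -1 := hj
        obtain ⟨hd, hne⟩ := pv_close_delta c j cnt hcl
        rw [pv_stepA_noemit _ _ _ _ (by simp [hne])]
        rw [ih (pvDelta cnt c) decls (cur ++ [c]) (by rw [hd]; exact pv_find_succ_none _ _ hj')]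
        simp
      | none =>
        rw [hcl] at hj
        have hj' : (if c = ';' ∧ pvDepthOf cnt = [0, 0, 0] then ((0 : Nat) : Int)
            else pvFindSemi cs 1 (pvDepthOf cnt)) = -1 := hj
        have hdc : pvDelta cnt c = cnt := pv_other_delta c cnt ho hcl
        by_cases hc : c = ';' ∧ pvDepthOf cnt = [0, 0, 0]
        · rw [if_pos hc] at hj'; omega
        · rw [if_neg hc] at hj'
          rw [pv_stepA_noemit _ _ _ _ (by
            rw [hdc]
            rintro ⟨h1, h2, h3, h4⟩
            exact hc ⟨h1, by simp [pvDepthOf, h2, h3, h4]⟩)]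
          rw [hdc, ih cnt decls (cur ++ [c]) (pv_find_succ_none _ _ hj')]
          simp

theorem pv_fold_some : ∀ (cs : List Char) (cnt : Int × Int × Int) (j : Nat)
    (decls : List String) (cur : List Char),
    pvFindSemi cs 0 (pvDepthOf cnt) = (j : Int) →
    cs.foldl pvStepA (decls, cur, cnt)
      = (cs.drop (j + 1)).foldl pvStepA
          (decls ++ [String.ofList (PySem.Chars.strip (cur ++ cs.take (j + 1)))], [], (0, 0, 0)) := by
  intro cs
  induction cs with
  | nil =>
    intro cnt j decls cur hj
    rw [pvFindSemi] at hj
    omega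
  | cons c cs ih =>
    intro cnt j decls cur hj
    rw [pvFindSemi] at hj
    simp only [List.foldl_cons]
    cases ho : pvOpens.get? c with
    | some jx =>
      rw [ho] at hj
      have hj' : pvFindSemi cs 1 ((pvDepthOf cnt).modify jx (· + 1)) = (j : Int) := hj
      obtain ⟨hd, hne⟩ := pv_open_delta c jx cnt ho
      have hj1 : 1 ≤ j := by
        rcases pv_find_cases cs 1 ((pvDepthOf cnt).modify jx (· + 1)) with h | ⟨k, h⟩ <;>
          rw [h] at hj' <;> omega
      have hj0 : pvFindSemi cs 0 (pvDepthOf (pvDelta cnt c)) = (j : Int) - 1 := by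
        rw [hd]; exact pv_find_succ_eq _ _ hj' (by intro hcon; omega)
      rcases pv_find_cases cs 0 (pvDepthOf (pvDelta cnt c)) with h' | ⟨k, h'⟩
      · rw [h'] at hj0; omega
      · rw [h'] at hj0
        have hk : j = k + 1 := by omega
        rw [pv_stepA_noemit _ _ _ _ (by simp [hne])]
        rw [ih (pvDelta cnt c) k decls (cur ++ [c]) (by rw [h']; push_cast; omega)]
        subst hk
        simp [List.take_succ_cons, List.drop_succ_cons]
    | none =>
      rw [ho] at hj
      cases hcl : pvCloses.get? c with
      | some jx =>
        rw [hcl] at hj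
        have hj' : pvFindSemi cs 1 ((pvDepthOf cnt).modify jx (· - 1)) = (j : Int) := hj
        obtain ⟨hd, hne⟩ := pv_close_delta c jx cnt hcl
        have hj1 : 1 ≤ j := by
          rcases pv_find_cases cs 1 ((pvDepthOf cnt).modify jx (· - 1)) with h | ⟨k, h⟩ <;>
            rw [h] at hj' <;> omega
        have hj0 : pvFindSemi cs 0 (pvDepthOf (pvDelta cnt c)) = (j : Int) - 1 := by
          rw [hd]; exact pv_find_succ_eq _ _ hj' (by intro hcon; omega)
        rcases pv_find_cases cs 0 (pvDepthOf (pvDelta cnt c)) with h' | ⟨k, h'⟩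
        · rw [h'] at hj0; omega
        · rw [h'] at hj0
          have hk : j = k + 1 := by omega
          rw [pv_stepA_noemit _ _ _ _ (by simp [hne])]
          rw [ih (pvDelta cnt c) k decls (cur ++ [c]) (by rw [h']; push_cast; omega)]
          subst hk
          simp [List.take_succ_cons, List.drop_succ_cons]
      | none =>
        rw [hcl] at hj
        have hj' : (if c = ';' ∧ pvDepthOf cnt = [0, 0, 0] then ((0 : Nat) : Int)
            else pvFindSemi cs 1 (pvDepthOf cnt)) = (j : Int) := hj
        have hdc : pvDelta cnt c = cnt := pv_other_delta c cnt ho hcl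
        by_cases hc : c = ';' ∧ pvDepthOf cnt = [0, 0, 0]
        · rw [if_pos hc] at hj'
          have hj00 : j = 0 := by omega
          obtain ⟨hcs, hcd⟩ := hc
          have hcnt : cnt = (0, 0, 0) := (pv_depth_zero cnt).mp hcd
          subst hcs hcnt hj00
          rw [show pvStepA (decls, cur, ((0 : Int), (0 : Int), (0 : Int))) ';'
                = (decls ++ [String.ofList (PySem.Chars.strip (cur ++ [';']))], [], (0, 0, 0)) by
            simp [pvStepA, pvDelta]]
          simp
        · rw [if_neg hc] at hj'
          have hj1 : 1 ≤ j := by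
            rcases pv_find_cases cs 1 (pvDepthOf cnt) with h | ⟨k, h⟩ <;>
              rw [h] at hj' <;> omega
          have hj0 : pvFindSemi cs 0 (pvDepthOf cnt) = (j : Int) - 1 :=
            pv_find_succ_eq _ _ hj' (by intro hcon; omega)
          rcases pv_find_cases cs 0 (pvDepthOf cnt) with h' | ⟨k, h'⟩
          · rw [h'] at hj0; omega
          · rw [h'] at hj0
            have hk : j = k + 1 := by omega
            rw [pv_stepA_noemit _ _ _ _ (by
              rw [hdc]
              rintro ⟨h1, h2, h3, h4⟩
              exact hc ⟨h1, by simp [pvDepthOf, h2, h3, h4]⟩)]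
            rw [hdc, ih cnt k decls (cur ++ [c]) (by rw [h']; push_cast; omega)]
            subst hk
            simp [List.take_succ_cons, List.drop_succ_cons]

theorem pv_top : ∀ (n : Nat) (cs : List Char), cs.length ≤ n → ∀ (decls : List String),
    (cs.foldl pvStepA (decls, [], (0, 0, 0))).1 = pvGo cs decls := by
  intro n
  induction n with
  | zero =>
    intro cs hle decls
    have hnil : cs = [] := List.eq_nil_of_length_eq_zero (Nat.le_zero.mp hle)
    subst hnil
    rw [pvGo]
    simp [pvFindSemi_nil_neg]
  | succ n ih =>
    intro cs hle decls
    rcases pv_find_cases cs 0 [0, 0, 0] with h | ⟨j, h⟩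
    · rw [pv_fold_none cs (0, 0, 0) decls [] h]
      rw [pvGo]
      rw [dif_pos (by rw [h]; decide)]
    · rw [Nat.zero_add] at h
      have hne : cs ≠ [] := by
        intro e
        rw [e, pvFindSemi_nil_neg] at h
        omega
      rw [pv_fold_some cs (0, 0, 0) j decls [] h]
      rw [pvGo]
      rw [dif_neg (by rw [h]; omega)]
      rw [show pvFindSemi cs 0 [0, 0, 0] + 1 = ((j + 1 : Nat) : Int) by rw [h]; push_cast; ring]
      rw [PySem.List.slice_from_natCast, PySem.List.slice_to_natCast]
      rw [← ih (cs.drop (j + 1)) (by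
        have := List.length_pos_of_ne_nil hne
        simp only [List.length_drop]
        omega) (decls ++ [String.ofList (PySem.Chars.strip (cs.take (j + 1)))])]
      simp

-- ===== VERDICT (by name: the statement is the Claim_ definition above) =====
theorem extract_declarations_spec : Claim_equal_extract_declarations := by
  intro s _
  show extract_declarations s = extract_declarations_alt s
  unfold extract_declarations extract_declarations_alt
  exact pv_top s.toList.length s.toList le_rfl []
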